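-- pv_equiv track=rewrite | github.com/k-tsky/DigiCod | Blockcodes.py | generate_codewords_crc
-- ===== SOURCE A (Python) =====
-- def poly_div(dividend, divisor):
--     remainder = dividend[:]
--     while len(remainder) >= len(divisor):
--         if remainder[0] == 1:
--             for i in range(len(divisor)):
--                 if i < len(remainder):  # Sicherstellen, dass Index gültig ist
--                     remainder[i] ^= divisor[i]
--         remainder.pop(0)
--     return remainder
--
-- def message_to_polynomial(msg_bits, r):
--     return msg_bits + [0] * r
--
-- def encode(generator, message_bits):
--     r = len(generator) - 1
--     poly = message_to_polynomial(message_bits, r)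
--     remainder = poly_div(poly[:], generator)
--     return message_bits + remainder
--
-- def generate_codewords_crc(generator):
--     k = len(generator) - 1
--     n = 2 ** (k-1) - 1
--     m = n - k
--     codewords = []
--     for i in range(min(2 ** m, 6)):
--         msg = [int(b) for b in bin(i)[2:].zfill(m)]
--         codeword = encode(generator, msg)
--         codewords.append(codeword)
--     return codewords, m, n, k
-- ===== SOURCE B (Python) =====
-- def crc_remainder(generator, msg_bits):
--     # bit-serial LFSR: shift dividend bits through an r-bit register,
--     # XOR the generator tail in whenever the bit shifted out equals 1
--     r = len(generator) - 1
--     dividend = msg_bits + [0] * r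
--     reg = dividend[:r]
--     for b in dividend[r:]:
--         top = reg[0]
--         reg = reg[1:] + [b]
--         if top == 1:
--             reg = [x ^ g for x, g in zip(reg, generator[1:])]
--     return reg
--
-- def encode(generator, message_bits):
--     return message_bits + crc_remainder(generator, message_bits)
--
-- def generate_codewords_crc(generator):
--     k = len(generator) - 1
--     n = 2 ** (k-1) - 1
--     m = n - k
--     codewords = []
--     for i in range(min(2 ** m, 6)):
--         msg = [int(b) for b in bin(i)[2:].zfill(m)]
--         codeword = encode(generator, msg)
--         codewords.append(codeword)
--     return codewords, m, n, k
-- ===== Notes on version B (the rewrite author's own statement) =====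
-- stated objective: alternative
-- what changed: poly_div's list-rewriting long division (copy the dividend, XOR the full divisor into the prefix, pop(0) the front each round) is replaced by a bit-serial LFSR CRC: an r-entry shift register fed once with the dividend bits, XORing the generator tail in when the outgoing entry is 1; the driver loop is unchanged.
-- outside the precondition, e.g. on generate_codewords_crc([1, 1, 1]): A raises TypeError, B raises TypeError
import Mathlib
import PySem

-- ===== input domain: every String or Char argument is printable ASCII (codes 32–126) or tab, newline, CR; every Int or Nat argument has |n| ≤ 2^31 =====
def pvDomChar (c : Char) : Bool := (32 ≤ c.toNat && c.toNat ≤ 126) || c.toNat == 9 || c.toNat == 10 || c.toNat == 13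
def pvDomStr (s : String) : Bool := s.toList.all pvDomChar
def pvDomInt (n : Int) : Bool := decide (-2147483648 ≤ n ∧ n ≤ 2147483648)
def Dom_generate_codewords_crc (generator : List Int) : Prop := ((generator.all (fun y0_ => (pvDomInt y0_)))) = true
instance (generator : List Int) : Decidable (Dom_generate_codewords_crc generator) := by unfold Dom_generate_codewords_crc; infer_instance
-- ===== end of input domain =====

-- B replaces poly_div's list-rewriting long division by a bit-serial LFSR shift register (same driver loop); equivalence proved on generators of length ≥ 4 (A raises TypeError below that).

-- ===== PORT A =====
-- remainder[i] ^= divisor[i] over the divisor-long prefix (the 'i < len(remainder)' guard is vacuous there)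
def pvXorPrefix : List Int → List Int → List Int
  | rem, [] => rem
  | [], _ :: _ => []
  | a :: r, b :: d => PySem.Int.bxor a b :: pvXorPrefix r d

theorem pvXorPrefix_length (r d : List Int) : (pvXorPrefix r d).length = r.length := by
  induction r generalizing d with
  | nil => cases d <;> simp [pvXorPrefix]
  | cons a r ih => cases d <;> simp [pvXorPrefix, ih]

-- the 'while len(remainder) >= len(divisor)' loop; on [] with divisor [] Python would raise in pop(0) (outside Pre_)
def pvPolyDivGo (divisor : List Int) : List Int → List Int
  | [] => []
  | x :: rest =>
    if divisor.length ≤ rest.length + 1 then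
      pvPolyDivGo divisor (if x == 1 then (pvXorPrefix (x :: rest) divisor).tail else rest)
    else x :: rest
termination_by rem => rem.length
decreasing_by
  split <;> simp [pvXorPrefix_length, List.length_tail]

def poly_div_A (dividend divisor : List Int) : List Int := pvPolyDivGo divisor dividend

def pvMessageToPolynomial (msg : List Int) (r : Int) : List Int := msg ++ List.replicate r.toNat 0

def pvEncodeA (generator msg : List Int) : List Int :=
  msg ++ poly_div_A (pvMessageToPolynomial msg ((generator.length : Int) - 1)) generator

-- bin(i)[2:] as a digit list (msb first); int(ch) on each char is the identity on these digits
def pvBinGo (i : Nat) : List Int :=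
  if h : i = 0 then [] else pvBinGo (i / 2) ++ [((i % 2 : Nat) : Int)]
termination_by i
decreasing_by exact Nat.div_lt_self (Nat.pos_of_ne_zero h) (by omega)

def pvBin (i : Nat) : List Int := if i = 0 then [0] else pvBinGo i

-- [int(b) for b in bin(i)[2:].zfill(m)]
def pvMsg (i : Nat) (m : Int) : List Int :=
  List.replicate (m - (pvBin i).length).toNat 0 ++ pvBin i

def generate_codewords_crc (generator : List Int) : List (List Int) × Int × Int × Int :=
  let k : Int := (generator.length : Int) - 1
  -- Python's 2**(k-1) is a float when k < 1 and the loop then raises TypeError (those inputs are outside Pre_)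
  let n : Int := 2 ^ (k - 1).toNat - 1
  let m : Int := n - k
  let codewords := (List.range (min ((2 : Int) ^ m.toNat) 6).toNat).foldl
      (fun acc i => acc ++ [pvEncodeA generator (pvMsg i m)]) ([] : List (List Int))
  (codewords, m, n, k)

-- ===== PORT B =====
def pvCrcRemainder (generator msg : List Int) : List Int :=
  let r : Nat := generator.length - 1
  let dividend := msg ++ List.replicate r (0 : Int)
  (dividend.drop r).foldl (fun reg b =>
    match reg with
    | [] => []  -- Python B would raise at reg[0] only when r = 0 (outside Pre_)
    | top :: rest =>
      let reg' := rest ++ [b]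
      if top == 1 then List.zipWith PySem.Int.bxor reg' generator.tail else reg')
    (dividend.take r)

def pvEncodeAlt (generator msg : List Int) : List Int := msg ++ pvCrcRemainder generator msg

def generate_codewords_crc_alt (generator : List Int) : List (List Int) × Int × Int × Int :=
  let k : Int := (generator.length : Int) - 1
  let n : Int := 2 ^ (k - 1).toNat - 1
  let m : Int := n - k
  let codewords := (List.range (min ((2 : Int) ^ m.toNat) 6).toNat).foldl
      (fun acc i => acc ++ [pvEncodeAlt generator (pvMsg i m)]) ([] : List (List Int))
  (codewords, m, n, k)

-- ===== PRECONDITION & SPEC =====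
-- Pre_ excludes exactly the generators of length < 4: there k < 3 makes 2**(k-1) or 2**m a float and A raises TypeError.
def Pre_generate_codewords_crc (generator : List Int) : Prop := 4 ≤ generator.length
instance (generator : List Int) : Decidable (Pre_generate_codewords_crc generator) := by
  unfold Pre_generate_codewords_crc; infer_instance

def pvWitness_generate_codewords_crc : List Int := [1, 0, 1, 1]

def Spec_generate_codewords_crc (generator : List Int) (out : List (List Int) × Int × Int × Int) : Prop := out = generate_codewords_crc_alt generator
instance (generator : List Int) (out : List (List Int) × Int × Int × Int) : Decidable (Spec_generate_codewords_crc generator out) := by unfold Spec_generate_codewords_crc; infer_instance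

-- ===== CLAIM (what is proved, stated in full; the proofs are below) =====
def Claim_equal_generate_codewords_crc : Prop := ∀ (generator : List Int), Dom_generate_codewords_crc generator → Pre_generate_codewords_crc generator → Spec_generate_codewords_crc generator (generate_codewords_crc generator)

-- ===== LEMMAS AND PROOFS =====
theorem pvXorPrefix_eq (r d : List Int) :
    pvXorPrefix r d = List.zipWith PySem.Int.bxor r d ++ r.drop d.length := by
  induction r generalizing d with
  | nil => cases d <;> simp [pvXorPrefix]
  | cons a r ih => cases d <;> simp [pvXorPrefix, ih]

theorem zipWith_take_left (f : Int → Int → Int) (l dt : List Int) :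
    List.zipWith f (l.take dt.length) dt = List.zipWith f l dt := by
  induction l generalizing dt with
  | nil => simp
  | cons a l ih => cases dt with
    | nil => simp
    | cons b dt => simp [ih]

-- the register-update step of B's LFSR (definitionally the lambda inside pvCrcRemainder)
def lfsrStep (g : List Int) : List Int → Int → List Int := fun reg b =>
  match reg with
  | [] => []
  | top :: rest =>
    let reg' := rest ++ [b]
    if top == 1 then List.zipWith PySem.Int.bxor reg' g.tail else reg'

theorem lfsrStep_cons (g : List Int) (top : Int) (rest : List Int) (b : Int) :
    lfsrStep g (top :: rest) b =
      if top == 1 then List.zipWith PySem.Int.bxor (rest ++ [b]) g.tail else rest ++ [b] := rfl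

theorem lfsr_core (g : List Int) (hg : 2 ≤ g.length) :
    ∀ (N : Nat) (rem : List Int), rem.length = N → g.length - 1 ≤ rem.length →
    pvPolyDivGo g rem =
      (rem.drop (g.length - 1)).foldl (lfsrStep g) (rem.take (g.length - 1)) := by
  intro N
  induction N using Nat.strong_induction_on with
  | _ N ih =>
    intro rem hlen hge
    obtain ⟨d0, dt, rfl⟩ : ∃ d0 dt, g = d0 :: dt := by
      cases g with
      | nil => simp at hg
      | cons d0 dt => exact ⟨d0, dt, rfl⟩
    obtain ⟨r', hr'⟩ : ∃ r', dt.length = r' + 1 := by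
      cases dt with
      | nil => simp at hg
      | cons b dt => exact ⟨dt.length, rfl⟩
    simp only [List.length_cons, Nat.add_sub_cancel] at hge ⊢
    cases rem with
    | nil => simp at hge; simp [hge] at hr'
    | cons x rest =>
      by_cases hc : dt.length ≤ rest.length
      · -- loop body runs once, then induction on the shortened remainder
        rw [pvPolyDivGo, if_pos (by simpa using hc)]
        have hT : ∀ T : List Int, T.length = rest.length →
            pvPolyDivGo (d0 :: dt) T =
              (T.drop dt.length).foldl (lfsrStep (d0 :: dt)) (T.take dt.length) := by
          intro T h1
          have := ih rest.length (by simp at hlen; omega) T h1 (by simpa [h1] using hc)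
          simpa using this
        have hr'' : r' < rest.length := by omega
        have hdropc : rest.drop r' = rest[r'] :: rest.drop (r' + 1) :=
          List.drop_eq_getElem_cons hr''
        have htakec : rest.take r' ++ [rest[r']] = rest.take (r' + 1) :=
          List.take_append_getElem hr''
        by_cases hx : x = 1
        · -- leading entry is 1: A XORs the full divisor in and pops; B XORs the tail into the register
          subst hx
          rw [if_pos (by simp)]
          have htail : (pvXorPrefix (1 :: rest) (d0 :: dt)).tail = pvXorPrefix rest dt := by
            simp [pvXorPrefix]
          rw [htail, hT _ (pvXorPrefix_length rest dt)]
          rw [pvXorPrefix_eq]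
          have hzlen : (List.zipWith PySem.Int.bxor rest dt).length = dt.length := by
            simp; omega
          rw [List.take_left' hzlen, List.drop_left' hzlen]
          conv_rhs => rw [hr']
          rw [List.drop_succ_cons, List.take_succ_cons, hdropc, List.foldl_cons,
            lfsrStep_cons, if_pos (by simp)]
          rw [htakec, ← hr', List.tail_cons, zipWith_take_left]
        · -- leading entry not 1: A only pops; B only shifts
          rw [if_neg (by simpa using hx), hT rest rfl]
          conv_rhs => rw [hr']
          rw [List.drop_succ_cons, List.take_succ_cons, hdropc, List.foldl_cons,
            lfsrStep_cons, if_neg (by simpa using hx)]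
          rw [htakec, ← hr']
      · -- remainder shorter than the divisor: the while loop has already stopped
        rw [pvPolyDivGo, if_neg (by simpa using hc)]
        rw [List.drop_eq_nil_of_le (by simp; omega), List.take_of_length_le (by simp; omega)]
        simp

theorem encode_eq (g : List Int) (hg : 2 ≤ g.length) (msg : List Int) :
    pvEncodeA g msg = pvEncodeAlt g msg := by
  have h1 : ((g.length : Int) - 1).toNat = g.length - 1 := by omega
  have h2 : pvCrcRemainder g msg =
      ((msg ++ List.replicate (g.length - 1) (0 : Int)).drop (g.length - 1)).foldl
        (lfsrStep g) ((msg ++ List.replicate (g.length - 1) (0 : Int)).take (g.length - 1)) := rfl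
  simp only [pvEncodeA, pvEncodeAlt, poly_div_A, pvMessageToPolynomial, h1, h2]
  congr 1
  exact lfsr_core g hg _ _ rfl (by simp)

-- ===== VERDICT (by name: the statement is the Claim_ definition above) =====
theorem generate_codewords_crc_spec : Claim_equal_generate_codewords_crc := by
  intro g _ hpre
  unfold Spec_generate_codewords_crc
  have hg : 2 ≤ g.length := le_trans (by omega) hpre
  have h : (fun (acc : List (List Int)) (i : Nat) =>
      acc ++ [pvEncodeA g (pvMsg i (2 ^ (((g.length : Int) - 1) - 1).toNat - 1 - ((g.length : Int) - 1)))]) =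
      (fun (acc : List (List Int)) (i : Nat) =>
      acc ++ [pvEncodeAlt g (pvMsg i (2 ^ (((g.length : Int) - 1) - 1).toNat - 1 - ((g.length : Int) - 1)))]) := by
    funext acc i; rw [encode_eq g hg]
  simp only [generate_codewords_crc, generate_codewords_crc_alt, h]
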